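-- pv_equiv track=rewrite | github.com/mszg/refsetcollect | sampling_app/views.py | _extract_selected_genomes
-- ===== SOURCE A (Python) =====
-- def _extract_selected_genomes(text: str) -> str:
--     """
--     Strategy
--     --------
--     - Find the first line that starts with "Selected " and contains
--       "genomes". Rephrase it to "Selected <N> genomes" (drop timing and
--       node counts).
--     - After that header, keep only bullet lines that describe genomes
--       (lines beginning with a hyphen after optional whitespace).
--     - Stop once we leave the bullet list so later sections like "Total Time"
--       are omitted.
--     """
--     if not text:
--         return ""
--
--     lines = text.splitlines()
--     header = None
--     genome_lines: list[str] = []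
--     capturing = False
--
--     for ln in lines:
--         stripped = ln.strip()
--
--         if not capturing:
--             if stripped.startswith("Selected ") and "genomes" in stripped:
--                 # Try to normalize "Selected X genomes" header
--                 count = None
--                 try:
--                     count = int(stripped.split()[1])
--                 except Exception:
--                     count = None
--
--                 if count is not None:
--                     plural = "genomes" if count != 1 else "genome"
--                     header = f"Selected {count} {plural}"
--                 else:
--                     header = stripped
--
--                 capturing = True
--             continue
--
--         # Once capturing, keep only genome bullet lines.
--         if stripped.startswith("-"):
--             genome_lines.append(stripped)
--             continue
--
--         # Stop if we reached the end of the bullet block.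
--         if genome_lines and stripped:
--             break
--
--     if not header:
--         return ""
--
--     if genome_lines:
--         return "\n".join([header, *genome_lines])
--     return header
-- ===== SOURCE B (Python) =====
-- def _extract_selected_genomes(text: str) -> str:
--     # Pipeline decomposition: strip all lines up front, drop until the header
--     # line, normalize it, then drop/take/filter the bullet block.
--     lines = [ln.strip() for ln in text.splitlines()]
--     rest = lines
--     while rest and not (rest[0].startswith("Selected ") and "genomes" in rest[0]):
--         rest = rest[1:]
--     if not rest:
--         return ""
--     head, tail = rest[0], rest[1:]
--     try:
--         count = int(head.split()[1])
--         header = f"Selected {count} {'genome' if count == 1 else 'genomes'}"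
--     except (IndexError, ValueError):
--         header = head
--     while tail and not tail[0].startswith("-"):
--         tail = tail[1:]
--     block = []
--     while tail and (tail[0].startswith("-") or not tail[0]):
--         block.append(tail[0])
--         tail = tail[1:]
--     bullets = [b for b in block if b.startswith("-")]
--     return "\n".join([header] + bullets)
-- ===== Notes on version B (the rewrite author's own statement) =====
-- stated objective: alternative
-- what changed: Replaces A's single stateful loop (capturing flag, header/bullet accumulators, mid-loop break) by a stateless pipeline: strip all lines, drop lines up to the header, normalize it, then drop-until-first-bullet / take-while-bullet-or-blank / filter-bullets and join.
import Mathlib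
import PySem

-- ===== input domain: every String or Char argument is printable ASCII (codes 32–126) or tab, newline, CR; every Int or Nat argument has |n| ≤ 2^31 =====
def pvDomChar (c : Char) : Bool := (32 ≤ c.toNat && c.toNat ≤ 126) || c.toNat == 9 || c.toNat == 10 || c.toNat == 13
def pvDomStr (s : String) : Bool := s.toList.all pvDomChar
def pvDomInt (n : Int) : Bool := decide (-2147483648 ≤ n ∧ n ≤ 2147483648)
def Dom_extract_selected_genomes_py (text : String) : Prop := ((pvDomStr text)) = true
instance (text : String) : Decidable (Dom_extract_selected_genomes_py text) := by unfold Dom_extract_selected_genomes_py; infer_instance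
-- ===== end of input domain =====

-- B replaces A's single stateful loop (capturing flag, accumulators, break) by a
-- stateless strip-all / dropWhile / takeWhile / filter pipeline (objective: alternative).

-- ===== PORT A =====
-- 'count = int(stripped.split()[1])' inside try/except: IndexError or ValueError → none
def pvNormCountA (stripped : String) : Option Int :=
  match (PySem.Str.split₀ stripped)[1]? with
  | none => none
  | some w => PySem.Int.ofStr? w

-- A's loop; break returns immediately with the current state
def pvALoop (lines : List String) (header : Option String) (gls : List String)
    (capturing : Bool) : Option String × List String :=
  match lines with
  | [] => (header, gls)
  | ln :: rest =>
    let stripped := PySem.Str.strip ln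
    if !capturing then
      if PySem.Str.startswith stripped "Selected " && PySem.Str.isIn "genomes" stripped then
        let header' :=
          match pvNormCountA stripped with
          | some c =>
            "Selected " ++ PySem.Int.toStr c ++ " " ++
              (if c != 1 then "genomes" else "genome")
          | none => stripped
        pvALoop rest (some header') gls true
      else
        pvALoop rest header gls capturing
    else
      if PySem.Str.startswith stripped "-" then
        pvALoop rest header (gls ++ [stripped]) capturing
      else if gls != [] && stripped != "" then
        (header, gls)   -- break
      else
        pvALoop rest header gls capturing

def extract_selected_genomes_py (text : String) : String :=
  if text == "" then ""
  else
    let lines := PySem.Str.splitlines text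
    let r := pvALoop lines none [] false
    match r.1 with
    | none => ""
    | some h => if r.2 != [] then PySem.Str.join "\n" (h :: r.2) else h

-- ===== PORT B =====
-- Source B's try block, in Source B's order (int first, f-string on success)
def pvNormB (head : String) : String :=
  match (PySem.Str.split₀ head)[1]? with
  | none => head
  | some w =>
    match PySem.Int.ofStr? w with
    | none => head
    | some c =>
      "Selected " ++ PySem.Int.toStr c ++ " " ++
        (if c == 1 then "genome" else "genomes")

-- the three while-loops of Source B are the standard dropWhile / dropWhile / takeWhile
def extract_selected_genomes_py_alt (text : String) : String :=
  let lines := (PySem.Str.splitlines text).map PySem.Str.strip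
  let rest := lines.dropWhile
    (fun s => !(PySem.Str.startswith s "Selected " && PySem.Str.isIn "genomes" s))
  match rest with
  | [] => ""
  | head :: tail =>
    let header := pvNormB head
    let tail2 := tail.dropWhile (fun s => !PySem.Str.startswith s "-")
    let block := tail2.takeWhile (fun s => PySem.Str.startswith s "-" || s == "")
    let bullets := block.filter (fun s => PySem.Str.startswith s "-")
    PySem.Str.join "\n" (header :: bullets)

-- ===== PRECONDITION & SPEC =====
def Spec_extract_selected_genomes_py (text : String) (out : String) : Prop := out = extract_selected_genomes_py_alt text
instance (text : String) (out : String) : Decidable (Spec_extract_selected_genomes_py text out) := by unfold Spec_extract_selected_genomes_py; infer_instance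

-- ===== CLAIM (what is proved, stated in full; the proofs are below) =====
def Claim_equal_extract_selected_genomes_py : Prop := ∀ (text : String), Dom_extract_selected_genomes_py text → Spec_extract_selected_genomes_py text (extract_selected_genomes_py text)

-- ===== LEMMAS AND PROOFS =====

-- the bullets B extracts from the (already stripped) lines after the header
def pvBullets (ts : List String) : List String :=
  ((ts.dropWhile (fun s => !PySem.Str.startswith s "-")).takeWhile
      (fun s => PySem.Str.startswith s "-" || s == "")).filter
    (fun s => PySem.Str.startswith s "-")

lemma pvALoop_capt_ne (ls : List String) (h : Option String) (gls : List String)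
    (hg : gls ≠ []) :
    pvALoop ls h gls true =
      (h, gls ++ ((ls.map PySem.Str.strip).takeWhile
          (fun s => PySem.Str.startswith s "-" || s == "")).filter
        (fun s => PySem.Str.startswith s "-")) := by
  induction ls generalizing gls with
  | nil => simp [pvALoop]
  | cons ln rest ih =>
    simp only [pvALoop, List.map_cons, List.takeWhile_cons, Bool.not_true, Bool.false_eq_true,
      if_false]
    by_cases hb : PySem.Str.startswith (PySem.Str.strip ln) "-" = true
    · have hbC : PySem.Chars.startswith (PySem.Chars.strip ln.toList) ['-'] = true := by
        simpa using hb
      rw [if_pos hb, ih (gls ++ [PySem.Str.strip ln]) (by simp)]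
      simp [hbC]
    · have hb' : PySem.Str.startswith (PySem.Str.strip ln) "-" = false := by
        simpa using hb
      have hb'C : PySem.Chars.startswith (PySem.Chars.strip ln.toList) ['-'] = false := by
        simpa using hb'
      rw [if_neg (by simp [hb'C])]
      by_cases hz : PySem.Str.strip ln = ""
      · have hzB : (PySem.Str.strip ln == "") = true := beq_iff_eq.mpr hz
        have hzN : (PySem.Str.strip ln != "") = false := by simp [bne, hzB]
        rw [hzN]
        simp only [Bool.and_false, Bool.false_eq_true, if_false]
        rw [ih gls hg]
        simp [hz, show PySem.Chars.startswith ([] : List Char) ['-'] = false from by decide]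
      · have hzB : (PySem.Str.strip ln == "") = false := beq_eq_false_iff_ne.mpr hz
        have hzN : (PySem.Str.strip ln != "") = true := by simp [bne, hzB]
        have hgB : (gls != []) = true := by
          simpa [bne] using beq_eq_false_iff_ne.mpr hg
        rw [hgB, hzN]
        simp [hb'C, hzB]

lemma pvALoop_capt_nil (ls : List String) (h : Option String) :
    pvALoop ls h [] true = (h, pvBullets (ls.map PySem.Str.strip)) := by
  induction ls with
  | nil => simp [pvALoop, pvBullets]
  | cons ln rest ih =>
    simp only [pvALoop, Bool.not_true, Bool.false_eq_true, if_false]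
    by_cases hb : PySem.Str.startswith (PySem.Str.strip ln) "-" = true
    · have hbC : PySem.Chars.startswith (PySem.Chars.strip ln.toList) ['-'] = true := by
        simpa using hb
      rw [if_pos hb, List.nil_append, pvALoop_capt_ne rest h [PySem.Str.strip ln] (by simp)]
      simp [pvBullets, hbC]
    · have hb' : PySem.Str.startswith (PySem.Str.strip ln) "-" = false := by
        simpa using hb
      have hb'C : PySem.Chars.startswith (PySem.Chars.strip ln.toList) ['-'] = false := by
        simpa using hb'
      rw [if_neg (by simp [hb'C])]
      simp only [bne_self_eq_false, Bool.false_and, Bool.false_eq_true, if_false]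
      rw [ih]
      simp [pvBullets, hb'C]

lemma pvALoop_cons_false (ln : String) (rest : List String) (h : Option String)
    (gls : List String) :
    pvALoop (ln :: rest) h gls false =
      (if PySem.Str.startswith (PySem.Str.strip ln) "Selected " &&
          PySem.Str.isIn "genomes" (PySem.Str.strip ln) then
        pvALoop rest (some (match pvNormCountA (PySem.Str.strip ln) with
          | some c => "Selected " ++ PySem.Int.toStr c ++ " " ++
              (if c != 1 then "genomes" else "genome")
          | none => PySem.Str.strip ln)) gls true
      else pvALoop rest h gls false) := by
  simp only [pvALoop, Bool.not_false, if_true]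

lemma pvALoop_search (ls : List String) :
    pvALoop ls none [] false =
      match ls.dropWhile (fun ln =>
          !(PySem.Str.startswith (PySem.Str.strip ln) "Selected " &&
            PySem.Str.isIn "genomes" (PySem.Str.strip ln))) with
      | [] => (none, [])
      | m :: t =>
        pvALoop t (some (match pvNormCountA (PySem.Str.strip m) with
          | some c => "Selected " ++ PySem.Int.toStr c ++ " " ++
              (if c != 1 then "genomes" else "genome")
          | none => PySem.Str.strip m)) [] true := by
  induction ls with
  | nil => simp [pvALoop]
  | cons ln rest ih =>
    rw [pvALoop_cons_false, List.dropWhile_cons]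
    by_cases hp : (PySem.Str.startswith (PySem.Str.strip ln) "Selected " &&
        PySem.Str.isIn "genomes" (PySem.Str.strip ln)) = true
    · rw [if_pos hp, hp]
      rfl
    · have hp' : (PySem.Str.startswith (PySem.Str.strip ln) "Selected " &&
          PySem.Str.isIn "genomes" (PySem.Str.strip ln)) = false :=
        Bool.eq_false_iff.mpr hp
      rw [if_neg hp, hp']
      exact ih

lemma pvNorm_eq (s : String) :
    (match pvNormCountA s with
      | some c => "Selected " ++ PySem.Int.toStr c ++ " " ++
          (if c != 1 then "genomes" else "genome")
      | none => s) = pvNormB s := by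
  unfold pvNormCountA pvNormB
  rcases h1 : (PySem.Str.split₀ s)[1]? with _ | w
  · rfl
  · simp only []
    rcases h2 : PySem.Int.ofStr? w with _ | c
    · rfl
    · by_cases hc : c = 1 <;> simp [hc]

lemma pvJoin_singleton (h : String) : PySem.Str.join "\n" [h] = h := by
  simp [PySem.Str.join]

-- B's result, with its let-pipeline named (pvBullets is literally tail2/block/bullets)
lemma pvAlt_eq (text : String) :
    extract_selected_genomes_py_alt text =
      match ((PySem.Str.splitlines text).map PySem.Str.strip).dropWhile
          (fun s => !(PySem.Str.startswith s "Selected " && PySem.Str.isIn "genomes" s)) with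
      | [] => ""
      | head :: tail => PySem.Str.join "\n" (pvNormB head :: pvBullets tail) := by
  unfold extract_selected_genomes_py_alt
  rcases h : ((PySem.Str.splitlines text).map PySem.Str.strip).dropWhile
      (fun s => !(PySem.Str.startswith s "Selected " && PySem.Str.isIn "genomes" s)) with _ | ⟨hd, tl⟩
  · simp only [h]
  · simp only [h]; rfl

-- ===== VERDICT (by name: the statement is the Claim_ definition above) =====
theorem extract_selected_genomes_py_spec : Claim_equal_extract_selected_genomes_py := by
  intro text _
  unfold Spec_extract_selected_genomes_py
  rw [pvAlt_eq]
  by_cases ht : text = ""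
  · subst ht; decide
  · have ht' : (text == "") = false := beq_eq_false_iff_ne.mpr ht
    unfold extract_selected_genomes_py
    simp only [ht', Bool.false_eq_true, if_false]
    rw [pvALoop_search]
    rw [show (((PySem.Str.splitlines text).map PySem.Str.strip).dropWhile
        (fun s => !(PySem.Str.startswith s "Selected " && PySem.Str.isIn "genomes" s))) =
        (((PySem.Str.splitlines text).dropWhile (fun ln =>
          !(PySem.Str.startswith (PySem.Str.strip ln) "Selected " &&
            PySem.Str.isIn "genomes" (PySem.Str.strip ln)))).map PySem.Str.strip) from
      List.dropWhile_map]
    rcases hd : (PySem.Str.splitlines text).dropWhile (fun ln =>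
        !(PySem.Str.startswith (PySem.Str.strip ln) "Selected " &&
          PySem.Str.isIn "genomes" (PySem.Str.strip ln))) with _ | ⟨m, t⟩
    · rfl
    · simp only [List.map_cons]
      rw [pvALoop_capt_nil]
      simp only []
      rw [pvNorm_eq]
      by_cases hb : pvBullets (t.map PySem.Str.strip) = []
    
      · have hbN : (pvBullets (t.map PySem.Str.strip) != []) = false := by
          simp [bne, hb]
        rw [hb] at hbN ⊢
        simp only [hbN, Bool.false_eq_true, if_false]
        exact (pvJoin_singleton _).symm
      · have hbN : (pvBullets (t.map PySem.Str.strip) != []) = true := by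
          simpa [bne] using beq_eq_false_iff_ne.mpr hb
        simp only [hbN, if_true]
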